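-- pv_equiv track=rewrite | github.com/FamALouiz/motip | src/permutation/strategy/greedy.py | _has_left_then_right_free_order
-- ===== SOURCE A (Python) =====
-- def _has_left_then_right_free_order(
--     desired_free: list[int], left_free: set[int], right_free: set[int]
-- ) -> bool:
--     """Check whether desired free-index order can be realized without output permutation."""
--     seen_right = False
--     for idx in desired_free:
--         if idx in right_free:
--             seen_right = True
--         elif idx in left_free and seen_right:
--             return False
--     return True
-- ===== SOURCE B (Python) =====
-- def _has_left_then_right_free_order(
--     desired_free: list[int], left_free: set[int], right_free: set[int]
-- ) -> bool:
--     """Valid iff the latest left-only position precedes the earliest right position."""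
--     rpos = [i for i, x in enumerate(desired_free) if x in right_free]
--     lpos = [i for i, x in enumerate(desired_free) if x in left_free and x not in right_free]
--     return not rpos or not lpos or max(lpos) < min(rpos)
-- ===== Notes on version B (the rewrite author's own statement) =====
-- stated objective: alternative
-- what changed: Replaces the stateful seen_right early-return scan with an index-based formulation: collect right positions and left-only positions, then validity is 'either list empty or max(left-only positions) < min(right positions)'.
import Mathlib
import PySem

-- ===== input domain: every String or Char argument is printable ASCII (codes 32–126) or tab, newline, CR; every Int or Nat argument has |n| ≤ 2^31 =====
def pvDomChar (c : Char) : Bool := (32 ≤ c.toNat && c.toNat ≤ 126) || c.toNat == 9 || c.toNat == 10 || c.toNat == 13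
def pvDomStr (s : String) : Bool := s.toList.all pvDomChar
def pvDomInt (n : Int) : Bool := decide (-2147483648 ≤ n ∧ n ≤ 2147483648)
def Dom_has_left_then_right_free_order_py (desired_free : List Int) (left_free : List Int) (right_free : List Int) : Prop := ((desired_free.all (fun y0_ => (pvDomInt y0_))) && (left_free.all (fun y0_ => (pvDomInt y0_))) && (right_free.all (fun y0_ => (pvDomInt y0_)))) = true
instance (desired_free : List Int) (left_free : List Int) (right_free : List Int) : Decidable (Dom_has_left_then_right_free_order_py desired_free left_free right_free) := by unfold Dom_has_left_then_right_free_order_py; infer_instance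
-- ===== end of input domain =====

-- B replaces A's stateful seen_right scan by comparing the latest left-only position
-- with the earliest right position (objective: alternative decomposition, same cost).

-- ===== PORT A =====
-- the for-loop of A with its `seen_right` flag and early return, as structural recursion
def pvLoopA (left_free right_free : List Int) : List Int → Bool → Bool
  | [], _ => true
  | idx :: rest, seen_right =>
    if right_free.contains idx then pvLoopA left_free right_free rest true
    else if left_free.contains idx && seen_right then false
    else pvLoopA left_free right_free rest seen_right

def has_left_then_right_free_order_py (desired_free : List Int) (left_free : List Int) (right_free : List Int) : Bool :=
  pvLoopA left_free right_free desired_free false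

-- ===== PORT B =====
def has_left_then_right_free_order_py_alt (desired_free : List Int) (left_free : List Int) (right_free : List Int) : Bool :=
  let rpos := ((PySem.List.enumerate desired_free).filter (fun p => right_free.contains p.2)).map (·.1)
  let lpos := ((PySem.List.enumerate desired_free).filter (fun p => left_free.contains p.2 && !right_free.contains p.2)).map (·.1)
  match PySem.List.max? lpos (fun y => y), PySem.List.min? rpos (fun y => y) with
  | some ml, some mr => decide (ml < mr)
  | _, _ => true

-- ===== PRECONDITION & SPEC =====
def Spec_has_left_then_right_free_order_py (desired_free : List Int) (left_free : List Int) (right_free : List Int) (out : Bool) : Prop := out = has_left_then_right_free_order_py_alt desired_free left_free right_free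
instance (desired_free : List Int) (left_free : List Int) (right_free : List Int) (out : Bool) : Decidable (Spec_has_left_then_right_free_order_py desired_free left_free right_free out) := by unfold Spec_has_left_then_right_free_order_py; infer_instance

-- ===== CLAIM (what is proved, stated in full; the proofs are below) =====
def Claim_equal_has_left_then_right_free_order_py : Prop := ∀ (desired_free : List Int) (left_free : List Int) (right_free : List Int), Dom_has_left_then_right_free_order_py desired_free left_free right_free → Spec_has_left_then_right_free_order_py desired_free left_free right_free (has_left_then_right_free_order_py desired_free left_free right_free)

-- ===== LEMMAS AND PROOFS =====

-- reference predicate: some right element is followed by a left-only element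
def pvBad (l r : List Int) : List Int → Bool
  | [] => false
  | x :: xs => if r.contains x then xs.any (fun y => l.contains y && !r.contains y) else pvBad l r xs

-- B's two position lists, with a generalized enumeration start s
def pvRp (r : List Int) (s : Int) (xs : List Int) : List Int :=
  ((PySem.List.enumerate xs s).filter (fun p => r.contains p.2)).map (·.1)
def pvLp (l r : List Int) (s : Int) (xs : List Int) : List Int :=
  ((PySem.List.enumerate xs s).filter (fun p => l.contains p.2 && !r.contains p.2)).map (·.1)
def pvBgen (l r : List Int) (s : Int) (xs : List Int) : Bool :=
  match PySem.List.max? (pvLp l r s xs) (fun y => y), PySem.List.min? (pvRp r s xs) (fun y => y) with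
  | some ml, some mr => decide (ml < mr)
  | _, _ => true

theorem pvLoopA_true (l r xs : List Int) :
    pvLoopA l r xs true = !(xs.any (fun y => l.contains y && !r.contains y)) := by
  induction xs with
  | nil => simp [pvLoopA]
  | cons x xs ih =>
    by_cases hr : x ∈ r <;> by_cases hl : x ∈ l <;>
      simp [pvLoopA, hr, hl, ih]

theorem pvLoopA_false (l r xs : List Int) :
    pvLoopA l r xs false = !(pvBad l r xs) := by
  induction xs with
  | nil => simp [pvLoopA, pvBad]
  | cons x xs ih =>
    by_cases hr : x ∈ r <;>
      simp [pvLoopA, pvBad, hr, ih, pvLoopA_true]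

theorem pv_mem_fst_ge (xs : List Int) (s y : Int)
    (h : y ∈ (PySem.List.enumerate xs s).map (·.1)) : s ≤ y := by
  rw [PySem.List.map_fst_enumerate] at h
  exact (PySem.List.mem_pyRange_one.mp h).1

theorem pv_mem_Rp_ge (r : List Int) (s : Int) (xs : List Int) (y : Int)
    (h : y ∈ pvRp r s xs) : s ≤ y := by
  apply pv_mem_fst_ge xs s y
  unfold pvRp at h
  rcases List.mem_map.mp h with ⟨p, hp, rfl⟩
  exact List.mem_map.mpr ⟨p, (List.mem_filter.mp hp).1, rfl⟩

theorem pv_mem_Lp_ge (l r : List Int) (s : Int) (xs : List Int) (y : Int)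
    (h : y ∈ pvLp l r s xs) : s ≤ y := by
  apply pv_mem_fst_ge xs s y
  unfold pvLp at h
  rcases List.mem_map.mp h with ⟨p, hp, rfl⟩
  exact List.mem_map.mpr ⟨p, (List.mem_filter.mp hp).1, rfl⟩

theorem pv_foldl_min_const (t : List Int) (a : Int) (h : ∀ y ∈ t, a ≤ y) :
    t.foldl min a = a := by
  induction t generalizing a with
  | nil => rfl
  | cons y t ih =>
    have hy : a ≤ y := h y (by simp)
    simp only [List.foldl_cons, min_eq_left hy]
    exact ih a (fun z hz => h z (by simp [hz]))

theorem pvLp_eq_nil_iff (l r : List Int) (s : Int) (xs : List Int) :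
    pvLp l r s xs = [] ↔ ∀ y ∈ xs, y ∈ l → y ∈ r := by
  unfold pvLp
  rw [List.map_eq_nil_iff, List.filter_eq_nil_iff]
  constructor
  · intro h y hy
    rw [← PySem.List.map_snd_enumerate xs s] at hy
    rcases List.mem_map.mp hy with ⟨p, hp, rfl⟩
    have := h p hp
    simp at this
    exact this
  · intro h p hp
    have hmem : p.2 ∈ xs := by
      rw [← PySem.List.map_snd_enumerate xs s]
      exact List.mem_map.mpr ⟨p, hp, rfl⟩
    simp
    exact h p.2 hmem

theorem pvBgen_eq (l r xs : List Int) : ∀ s : Int, pvBgen l r s xs = !(pvBad l r xs) := by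
  induction xs with
  | nil => intro s; simp [pvBgen, pvLp, pvRp, PySem.List.enumerate_nil, PySem.List.max?, PySem.List.min?, pvBad]
  | cons x xs ih =>
    intro s
    by_cases hr : x ∈ r
    · -- x is a right element: min of rpos is s; valid iff no left-only element remains
      have hRp : pvRp r s (x :: xs) = s :: pvRp r (s + 1) xs := by
        simp [pvRp, PySem.List.enumerate_cons, hr]
      have hLp : pvLp l r s (x :: xs) = pvLp l r (s + 1) xs := by
        simp [pvLp, PySem.List.enumerate_cons, hr]
      have hmin : PySem.List.min? (pvRp r s (x :: xs)) (fun y => y) = some s := by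
        rw [hRp, PySem.List.min?_id_cons, pv_foldl_min_const _ _
          (fun y hy => by have := pv_mem_Rp_ge r (s + 1) xs y hy; omega)]
      have hbadc : pvBad l r (x :: xs) = xs.any (fun y => l.contains y && !r.contains y) := by
        simp [pvBad, hr]
      by_cases hany : (xs.any (fun y => l.contains y && !r.contains y)) = true
      · have hne : pvLp l r (s + 1) xs ≠ [] := by
          rw [Ne, pvLp_eq_nil_iff]
          simp at hany
          rcases hany with ⟨y, hy, hyl, hyr⟩
          intro h
          exact hyr (h y hy hyl)
        obtain ⟨ml, hml⟩ : ∃ ml, PySem.List.max? (pvLp l r (s + 1) xs) (fun y => y) = some ml := by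
          cases ht : pvLp l r (s + 1) xs with
          | nil => exact absurd ht hne
          | cons y t' => exact ⟨t'.foldl max y, PySem.List.max?_id_cons y t'⟩
        have hge : s + 1 ≤ ml := pv_mem_Lp_ge l r (s + 1) xs ml (PySem.List.max?_mem hml)
        unfold pvBgen
        rw [hLp, hml, hmin, hbadc, hany]
        have hnlt : ¬ (ml < s) := by omega
        simp [hnlt]
      · have h0 : pvLp l r (s + 1) xs = [] := by
          rw [pvLp_eq_nil_iff]
          simp at hany
          exact hany
        have hnone : PySem.List.max? (pvLp l r (s + 1) xs) (fun y => y) = none := by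
          rw [h0]; rfl
        unfold pvBgen
        rw [hLp, hnone, hmin, hbadc]
        simp at hany
        simp
        exact hany
    · -- x is not a right element: recurse
      have hRp : pvRp r s (x :: xs) = pvRp r (s + 1) xs := by
        simp [pvRp, PySem.List.enumerate_cons, hr]
      have hbad : pvBad l r (x :: xs) = pvBad l r xs := by simp [pvBad, hr]
      rw [hbad, ← ih (s + 1)]
      by_cases hl : x ∈ l
      · -- x is left-only: lpos gains s in front, which never changes the maximum comparison
        have hLp : pvLp l r s (x :: xs) = s :: pvLp l r (s + 1) xs := by
          simp [pvLp, PySem.List.enumerate_cons, hr, hl]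
        cases hmr : PySem.List.min? (pvRp r (s + 1) xs) (fun y => y) with
        | none =>
          unfold pvBgen
          rw [hRp, hLp, hmr, PySem.List.max?_id_cons]
          cases PySem.List.max? (pvLp l r (s + 1) xs) (fun y => y) <;> rfl
        | some mr =>
          have hmrge : s + 1 ≤ mr :=
            pv_mem_Rp_ge r (s + 1) xs mr (PySem.List.min?_mem hmr)
          cases ht : pvLp l r (s + 1) xs with
          | nil =>
            have hnone : PySem.List.max? (pvLp l r (s + 1) xs) (fun y => y) = none := by
              rw [ht]; rfl
            unfold pvBgen
            rw [hRp, hLp, hmr, PySem.List.max?_id_cons, hnone, ht, List.foldl_nil]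
            have hlt : s < mr := by omega
            simp [hlt]
          | cons y t' =>
            have hy : s ≤ y := by
              have := pv_mem_Lp_ge l r (s + 1) xs y (by rw [ht]; simp)
              omega
            have hml : PySem.List.max? (pvLp l r (s + 1) xs) (fun y => y)
                = some (t'.foldl max y) := by rw [ht]; exact PySem.List.max?_id_cons y t'
            unfold pvBgen
            rw [hRp, hLp, hmr, PySem.List.max?_id_cons, hml, ht, List.foldl_cons,
              max_eq_right hy]
      · have hLp : pvLp l r s (x :: xs) = pvLp l r (s + 1) xs := by
          simp [pvLp, PySem.List.enumerate_cons, hr, hl]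
        simp [pvBgen, hRp, hLp]

theorem pv_alt_eq_Bgen (d l r : List Int) :
    has_left_then_right_free_order_py_alt d l r = pvBgen l r 0 d := rfl

-- ===== VERDICT (by name: the statement is the Claim_ definition above) =====
theorem has_left_then_right_free_order_py_spec : Claim_equal_has_left_then_right_free_order_py := by
  intro d l r _
  unfold Spec_has_left_then_right_free_order_py
  rw [pv_alt_eq_Bgen, pvBgen_eq, has_left_then_right_free_order_py, pvLoopA_false]
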